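-- pv_equiv track=rewrite | github.com/jieunb3333/Algorithm | 프로그래머스/1/135808. 과일 장수/과일 장수.py | solution
-- ===== SOURCE A (Python) =====
-- def solution(k, m, score):
--
--     list = []
--     score.sort(reverse=True)
--
--     for i in range(0,len(score),m):
--         if(i+m<len(score)+1):
--             list.append(score[i:i+m])
--
--     apple_price_sum = 0
--     for apple in list:
--         apple_price_sum += min(apple)*m
--
--
--     return apple_price_sum
-- ===== SOURCE B (Python) =====
-- def solution(k, m, score):
--     counts = {}
--     for v in score:
--         counts[v] = counts.get(v, 0) + 1
--     n = len(score) // m          # number of full boxes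
--     total = 0
--     pos = 0                      # apples already placed (in descending value order)
--     for v in sorted(counts, reverse=True):
--         c = counts[v]
--         # boxes whose cheapest apple lies in this value block
--         total += v * m * (min((pos + c) // m, n) - min(pos // m, n))
--         pos += c
--     return total
-- ===== Notes on version B (the rewrite author's own statement) =====
-- stated objective: alternative
-- what changed: Replaces A's sort-of-the-whole-list, slicing into m-sized groups and per-group min() scans by a counting approach: build a value->count dict in one pass, walk only the distinct values in descending order, and compute with floor-division arithmetic how many group-minimum positions each value block covers; also B does not mutate score (A sorts it in place).
import Mathlib
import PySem

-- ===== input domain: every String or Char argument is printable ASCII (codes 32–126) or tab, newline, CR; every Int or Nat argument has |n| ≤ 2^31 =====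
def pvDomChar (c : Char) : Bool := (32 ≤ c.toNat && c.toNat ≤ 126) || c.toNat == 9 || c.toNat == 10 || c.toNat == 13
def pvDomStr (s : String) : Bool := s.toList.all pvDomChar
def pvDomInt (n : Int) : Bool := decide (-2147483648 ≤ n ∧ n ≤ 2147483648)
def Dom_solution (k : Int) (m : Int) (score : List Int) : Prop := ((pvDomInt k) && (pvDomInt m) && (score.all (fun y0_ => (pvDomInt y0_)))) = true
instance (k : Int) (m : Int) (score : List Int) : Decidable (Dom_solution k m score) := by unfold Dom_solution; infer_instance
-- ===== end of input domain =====

-- B replaces A's sort + slicing into m-groups + per-group min() by a counting approach: a value->count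
-- dict built in one pass, then a walk over the distinct values in descending order that counts with
-- floor-division arithmetic how many group-minimum positions fall in each value block (objective:
-- alternative). A sorts `score` in place, B does not mutate it; the equivalence is about the return value.


-- ===== PORT A =====
-- Python `min(apple)` raises on an empty list; the port's `.getD 0` is never reached: every
-- appended slice has exactly `m` elements (the `i+m < len+1` guard), and m > 0 whenever the loop runs.
def solution (k : Int) (m : Int) (score : List Int) : Int :=
  let srt := PySem.List.sorted score (fun x => x) true
  let lst := (PySem.List.pyRange 0 (srt.length : Int) m).foldl
    (fun acc i => if i + m < (srt.length : Int) + 1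
                  then acc ++ [PySem.List.slice srt (some i) (some (i + m))] else acc) []
  lst.foldl (fun s apple => s + (PySem.List.min? apple (fun x => x)).getD 0 * m) 0

-- ===== PORT B =====
def solution_alt (k : Int) (m : Int) (score : List Int) : Int :=
  let counts := score.foldl (fun d v => d.insert v (d.getD v 0 + 1)) PySem.Dict.empty
  let n := PySem.Int.floordiv (score.length : Int) m
  let res := (PySem.List.sorted counts.keys (fun x => x) true).foldl
    (fun (tp : Int × Int) v =>
      let c := counts.getD v 0
      (tp.1 + v * m * (min (PySem.Int.floordiv (tp.2 + c) m) n
                       - min (PySem.Int.floordiv tp.2 m) n),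
       tp.2 + c)) (0, 0)
  res.1

-- ===== PRECONDITION & SPEC =====
-- Pre_ excludes only m = 0, where A raises ValueError (range step 0) and B raises ZeroDivisionError.
def Pre_solution (k : Int) (m : Int) (score : List Int) : Prop := m ≠ 0
instance (k : Int) (m : Int) (score : List Int) : Decidable (Pre_solution k m score) := by unfold Pre_solution; infer_instance
def pvWitness_solution : Int × Int × List Int := (4, 2, [1, 2, 3, 1, 2])
def Spec_solution (k : Int) (m : Int) (score : List Int) (out : Int) : Prop := out = solution_alt k m score
instance (k : Int) (m : Int) (score : List Int) (out : Int) : Decidable (Spec_solution k m score out) := by unfold Spec_solution; infer_instance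

-- ===== CLAIM (what is proved, stated in full; the proofs are below) =====
def Claim_equal_solution : Prop := ∀ (k : Int) (m : Int) (score : List Int), Dom_solution k m score → Pre_solution k m score → Spec_solution k m score (solution k m score)

-- ===== LEMMAS AND PROOFS =====

-- folding Python's min-accumulator over a descending list, starting at its head, yields the last element
theorem pv_foldl_min_desc (f : Option Int → Int → Option Int)
    (hf : ∀ (mm x : Int), f (some mm) x = if x < mm then some x else some mm)
    (l : List Int) (a : Int)
    (h : (a :: l).Pairwise (fun x y : Int => y ≤ x)) :
    List.foldl f (some a) l = some ((a :: l).getLast (by simp)) := by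
  induction l generalizing a with
  | nil => simp
  | cons y ys ih =>
    have hy : y ≤ a := (List.pairwise_cons.mp h).1 y (by simp)
    have h' : (y :: ys).Pairwise (fun x y : Int => y ≤ x) := (List.pairwise_cons.mp h).2
    simp only [List.foldl_cons, hf]
    by_cases hlt : y < a
    · simp only [if_pos hlt]
      rw [ih y h']
      simp [List.getLast]
    · have : y = a := le_antisymm hy (not_lt.mp hlt)
      subst this
      simp only [if_neg hlt]
      rw [ih y h']
      simp [List.getLast]

-- min? of a nonempty descending Int list is its last element
theorem pv_min?_desc (l : List Int) (hne : l ≠ [])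
    (h : l.Pairwise (fun x y : Int => y ≤ x)) :
    PySem.List.min? l (fun x => x) = some (l.getLast hne) := by
  cases l with
  | nil => exact absurd rfl hne
  | cons a t =>
    show List.foldl _ none (a :: t) = _
    rw [List.foldl_cons]
    exact (pv_foldl_min_desc _ (fun mm x => rfl) t a h).trans (by congr 1)

-- for m > 0: A's slice-and-min loop equals the direct-index fold over the full groups
theorem pv_main_pos (L : List Int) (m' : Nat) (hm' : 0 < m')
    (hsort : L.Pairwise (fun a b : Int => b ≤ a)) :
    ((PySem.List.pyRange 0 (L.length : Int) (m' : Int)).foldl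
      (fun acc i => if i + (m' : Int) < (L.length : Int) + 1
                    then acc ++ [PySem.List.slice L (some i) (some (i + (m' : Int)))] else acc) []).foldl
      (fun s apple => s + (PySem.List.min? apple (fun x => x)).getD 0 * (m' : Int)) 0
    = (PySem.List.pyRange 0 (PySem.Int.floordiv (L.length : Int) (m' : Int)) 1).foldl
      (fun total g => total + (PySem.List.pyGet? L (g * (m' : Int) + (m' : Int) - 1)).getD 0 * (m' : Int)) 0 := by
  set len := L.length with hlen
  set nn := len / m' with hnn
  have hfd : PySem.Int.floordiv (len : Int) (m' : Int) = ((nn : Nat) : Int) :=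
    PySem.Int.floordiv_natCast len m'
  rw [hfd, PySem.List.pyRange_zero_natCast nn, List.foldl_map, PySem.List.foldl_add, zero_add]
  have hpos : (0 : Int) < (m' : Int) := by exact_mod_cast hm'
  rw [PySem.List.pyRange_of_pos 0 (len : Int) hpos, List.foldl_map]
  set c : Nat := (if (0:Int) < (len : Int) then (((len : Int) - 0 + (m' : Int) - 1) / (m' : Int)).toNat else 0) with hc
  have hcge : nn ≤ c := by
    rcases Nat.eq_zero_or_pos len with h0 | hlpos
    · simp [hnn, h0]
    · have : (0:Int) < (len:Int) := by exact_mod_cast hlpos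
      rw [hc, if_pos this]
      have h1 : ((len : Int) - 0 + (m' : Int) - 1) = ((len + m' - 1 : Nat) : Int) := by omega
      rw [h1]
      have h2 : (((len + m' - 1 : Nat) : Int) / ((m' : Nat) : Int)) = (((len + m' - 1) / m' : Nat) : Int) := by
        exact (Int.natCast_ediv (len + m' - 1) m').symm
      rw [h2, Int.toNat_natCast]
      exact Nat.div_le_div_right (by omega)
  rw [show c = nn + (c - nn) by omega, List.range_add, List.foldl_append]
  have hfirst : List.foldl
      (fun acc (k : Nat) => if (0 : Int) + (m' : Int) * (k : Int) + (m' : Int) < (len : Int) + 1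
        then acc ++ [PySem.List.slice L (some ((0 : Int) + (m' : Int) * (k : Int))) (some ((0 : Int) + (m' : Int) * (k : Int) + (m' : Int)))] else acc)
      ([] : List (List Int)) (List.range nn)
      = List.map (fun k => List.take m' (List.drop (k * m') L)) (List.range nn) := by
    rw [PySem.List.foldl_congr_mem (List.range nn) _
      (fun acc (k : Nat) => acc ++ [List.take m' (List.drop (k * m') L)]) []
      ?_ , PySem.List.foldl_append_singleton_eq_map]
    · simp
    · intro acc k hk
      have hklt : k < nn := List.mem_range.mp hk
      have hmul : (k + 1) * m' ≤ len := (Nat.le_div_iff_mul_le hm').mp (by omega)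
      have hcond : (0 : Int) + (m' : Int) * (k : Int) + (m' : Int) < (len : Int) + 1 := by
        have := Int.ofNat_le.mpr hmul
        push_cast at this
        nlinarith
      rw [if_pos hcond]
      congr 1
      have e1 : (0 : Int) + (m' : Int) * (k : Int) = ((k * m' : Nat) : Int) := by push_cast; ring
      rw [e1]
      have e2' : ((k * m' : Nat) : Int) + (m' : Int) = ((k * m' + m' : Nat) : Int) := by push_cast; ring
      rw [e2', PySem.List.slice_natCast]
      have e3 : k * m' + m' - k * m' = m' := by omega
      rw [e3]
  rw [hfirst]
  have hsecond : ∀ init : List (List Int), List.foldl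
      (fun acc (k : Nat) => if (0 : Int) + (m' : Int) * (k : Int) + (m' : Int) < (len : Int) + 1
        then acc ++ [PySem.List.slice L (some ((0 : Int) + (m' : Int) * (k : Int))) (some ((0 : Int) + (m' : Int) * (k : Int) + (m' : Int)))] else acc)
      init (List.map (fun x => nn + x) (List.range (c - nn))) = init := by
    intro init
    rw [PySem.List.foldl_congr_mem _ _ (fun acc _ => acc) init ?_]
    · exact List.foldl_fixed' (fun _ => rfl) _
    · intro acc k hk
      obtain ⟨j, hj, rfl⟩ := List.mem_map.mp hk
      have hlt : len < (nn + 1) * m' := by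
        have h3 : len / m' < nn + 1 := by omega
        exact (Nat.div_lt_iff_lt_mul hm').mp h3
      have hcond : ¬ ((0 : Int) + (m' : Int) * ((nn + j : Nat) : Int) + (m' : Int) < (len : Int) + 1) := by
        have := Int.ofNat_lt.mpr hlt
        push_cast at this ⊢
        nlinarith
      rw [if_neg hcond]
  rw [hsecond]
  rw [PySem.List.foldl_add, zero_add, List.map_map]
  congr 1
  apply List.map_congr_left
  intro k hk
  simp only [Function.comp_apply]
  have hklt : k < nn := List.mem_range.mp hk
  have hmul : (k + 1) * m' ≤ len := (Nat.le_div_iff_mul_le hm').mp (by omega)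
  have hidx : k * m' + m' - 1 < len := by
    have h := hmul
    rw [Nat.succ_mul] at h
    omega
  set g := List.take m' (List.drop (k * m') L) with hg
  have hglen : g.length = m' := by
    simp [hg, hlen.symm]
    omega
  have hgne : g ≠ [] := by
    intro h
    rw [h] at hglen
    simp at hglen
    omega
  have hgpair : g.Pairwise (fun a b : Int => b ≤ a) :=
    List.Pairwise.sublist ((List.take_sublist _ _).trans (List.drop_sublist _ _)) hsort
  rw [pv_min?_desc g hgne hgpair]
  have hlast : g.getLast hgne = L[k * m' + m' - 1]'(by omega) := by
    rw [List.getLast_eq_getElem, List.getElem_take, List.getElem_drop]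
    congr 1
    omega
  have hB : PySem.List.pyGet? L ((k : Int) * (m' : Int) + (m' : Int) - 1) = some (L[k * m' + m' - 1]'(by omega)) := by
    have e : (k : Int) * (m' : Int) + (m' : Int) - 1 = ((k * m' + m' - 1 : Nat) : Int) := by
      push_cast [Nat.cast_sub (show 1 ≤ k * m' + m' by omega)]
      ring
    rw [e, PySem.List.pyGet?_natCast, List.getElem?_eq_getElem (by omega)]
  rw [hB, hlast]

-- ----- B-side machinery: block decomposition of the descending sort -----

-- a flatMap of constant blocks with descending heads is descending
theorem pv_blocks_pairwise (D : List Int) (cnt : Int → Nat)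
    (h : D.Pairwise (fun a b : Int => b ≤ a)) :
    (D.flatMap (fun v => List.replicate (cnt v) v)).Pairwise (fun a b : Int => b ≤ a) := by
  induction D with
  | nil => simp
  | cons v rest ih =>
    rw [List.flatMap_cons, List.pairwise_append]
    refine ⟨List.pairwise_replicate.mpr (Or.inr le_rfl), ih (List.pairwise_cons.mp h).2, ?_⟩
    intro x hx y hy
    obtain rfl : x = v := List.eq_of_mem_replicate hx
    obtain ⟨u, hu, hyu⟩ := List.mem_flatMap.mp hy
    obtain rfl : y = u := List.eq_of_mem_replicate hyu
    exact (List.pairwise_cons.mp h).1 y hu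

theorem pv_blocks_count (D : List Int) (cnt : Int → Nat) (hnd : D.Nodup) (w : Int) :
    (D.flatMap (fun v => List.replicate (cnt v) v)).count w = if w ∈ D then cnt w else 0 := by
  induction D with
  | nil => simp
  | cons v rest ih =>
    rw [List.flatMap_cons, List.count_append, List.count_replicate,
        ih (List.nodup_cons.mp hnd).2]
    by_cases hv : w = v
    · subst hv
      have : w ∉ rest := (List.nodup_cons.mp hnd).1
      simp [this]
    · have hv' : ¬ v = w := fun h => hv h.symm
      simp [hv, hv', List.mem_cons]

-- the descending sort of score is the concatenation of constant blocks over its distinct values, descending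
theorem pv_sorted_eq_blocks (score : List Int) :
    PySem.List.sorted score (fun x => x) true
      = (PySem.List.sorted (PySem.Set.ofList score) (fun x => x) true).flatMap
          (fun v => List.replicate (score.count v) v) := by
  set D := PySem.List.sorted (PySem.Set.ofList score) (fun x => x) true with hD
  have hDnd : D.Nodup := ((PySem.List.sorted_perm _ _ _).nodup_iff).mpr (PySem.Set.nodup_ofList score)
  have hDpair : D.Pairwise (fun a b : Int => b ≤ a) := by
    simpa using PySem.List.sorted_pairwise_rev (PySem.Set.ofList score) (fun x => x)
  have hperm : (D.flatMap (fun v => List.replicate (score.count v) v)).Perm score := by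
    rw [List.perm_iff_count]
    intro w
    rw [pv_blocks_count D _ hDnd w]
    by_cases hw : w ∈ score
    · have : w ∈ D := by
        rw [hD, PySem.List.mem_sorted]
        exact (PySem.Set.mem_ofList score w).mpr hw
      simp [this]
    · have : w ∉ D := by
        rw [hD, PySem.List.mem_sorted]
        intro hc
        exact hw ((PySem.Set.mem_ofList score w).mp hc)
      simp [this, List.count_eq_zero_of_not_mem hw]
  have hLperm : (PySem.List.sorted score (fun x => x) true).Perm
      (D.flatMap (fun v => List.replicate (score.count v) v)) :=
    (PySem.List.sorted_perm _ _ _).trans hperm.symm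
  have hLpair : (PySem.List.sorted score (fun x => x) true).Pairwise (fun a b : Int => b ≤ a) := by
    simpa using PySem.List.sorted_pairwise_rev score (fun x => x)
  exact hLperm.eq_of_pairwise (fun a b _ _ h1 h2 => le_antisymm h2 h1) hLpair (pv_blocks_pairwise D _ hDpair)

-- number of group-end indices in [a*m', b*m') windows, as min arithmetic
theorem pv_filter_card (nn a b : Nat) (hab : a ≤ b) :
    ((Finset.range nn).filter (fun g => a ≤ g ∧ g < b)).card = min b nn - min a nn := by
  have h : (Finset.range nn).filter (fun g => a ≤ g ∧ g < b) = Finset.Ico a (min b nn) := by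
    ext g
    simp only [Finset.mem_filter, Finset.mem_range, Finset.mem_Ico]
    omega
  rw [h, Nat.card_Ico]
  omega

theorem pv_end_mem_iff (m' : Nat) (hm' : 0 < m') (p c g : Nat) :
    (p ≤ g * m' + m' - 1 ∧ g * m' + m' - 1 < p + c) ↔ (p / m' ≤ g ∧ g < (p + c) / m') := by
  have h1 : p / m' < g + 1 ↔ p < (g + 1) * m' := Nat.div_lt_iff_lt_mul hm'
  have h2 : g + 1 ≤ (p + c) / m' ↔ (g + 1) * m' ≤ p + c := Nat.le_div_iff_mul_le hm'
  have e : (g + 1) * m' = g * m' + m' := by ring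
  rw [e] at h1 h2
  omega

-- the central fold invariant: walking the remaining blocks from position p accumulates
-- m' times the sum of the group-end values at index ≥ p
theorem pv_blocks_fold (m' : Nat) (hm' : 0 < m') (L : List Int) (cnt : Int → Nat) :
    ∀ (D : List Int) (t : Int) (p : Nat),
    L.drop p = D.flatMap (fun v => List.replicate (cnt v) v) →
    (D.foldl (fun (tp : Int × Int) v =>
        (tp.1 + v * (m' : Int) * (min (PySem.Int.floordiv (tp.2 + (cnt v : Int)) (m' : Int)) ((L.length / m' : Nat) : Int)
            - min (PySem.Int.floordiv tp.2 (m' : Int)) ((L.length / m' : Nat) : Int)),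
         tp.2 + (cnt v : Int))) (t, (p : Int))).1
      = t + (m' : Int) * ∑ g ∈ (Finset.range (L.length / m')).filter (fun g => p ≤ g * m' + m' - 1),
          L.getD (g * m' + m' - 1) 0 := by
  intro D
  induction D with
  | nil =>
    intro t p hdrop
    have hlen : L.length ≤ p := by
      have := congrArg List.length hdrop
      simp at this
      omega
    have hempty : (Finset.range (L.length / m')).filter (fun g => p ≤ g * m' + m' - 1) = ∅ := by
      rw [Finset.filter_eq_empty_iff]
      intro g hg
      have hglt : g < L.length / m' := Finset.mem_range.mp hg
      have h1 : (g + 1) * m' ≤ (L.length / m') * m' :=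
        Nat.mul_le_mul_right m' (by omega)
      have h2 : (L.length / m') * m' ≤ L.length := Nat.div_mul_le_self _ _
      have e : (g + 1) * m' = g * m' + m' := by ring
      omega
    simp [hempty]
  | cons v rest ih =>
    intro t p hdrop
    rw [List.flatMap_cons] at hdrop
    have hd2 : L.drop (p + cnt v) = rest.flatMap (fun v => List.replicate (cnt v) v) := by
      have h := congrArg (List.drop (cnt v)) hdrop
      rwa [List.drop_drop,
           show List.drop (cnt v) (List.replicate (cnt v) v ++ rest.flatMap (fun v => List.replicate (cnt v) v))
              = rest.flatMap (fun v => List.replicate (cnt v) v) from by simp] at h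
    rw [List.foldl_cons]
    have hcast : ((p : Int) + (cnt v : Int)) = ((p + cnt v : Nat) : Int) := by push_cast; ring
    rw [hcast]
    rw [ih _ (p + cnt v) hd2]
    -- now compute the step term
    set nn := L.length / m' with hnn
    set a := p / m' with ha
    set b := (p + cnt v) / m' with hb
    have hab : a ≤ b := Nat.div_le_div_right (by omega)
    have hΔ : min (PySem.Int.floordiv ((p + cnt v : Nat) : Int) (m' : Int)) ((nn : Nat) : Int)
            - min (PySem.Int.floordiv (p : Int) (m' : Int)) ((nn : Nat) : Int)
            = ((min b nn - min a nn : Nat) : Int) := by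
      rw [PySem.Int.floordiv_natCast, PySem.Int.floordiv_natCast]
      have h1 : min ((b : Nat) : Int) ((nn : Nat) : Int) = ((min b nn : Nat) : Int) := by
        simp [Nat.cast_min]
      have h2 : min ((a : Nat) : Int) ((nn : Nat) : Int) = ((min a nn : Nat) : Int) := by
        simp [Nat.cast_min]
      rw [h1, h2]
      have : min a nn ≤ min b nn := by omega
      omega
    -- the mid-window sum
    have hT : ((Finset.range nn).filter (fun g => p ≤ g * m' + m' - 1 ∧ g * m' + m' - 1 < p + cnt v))
            = (Finset.range nn).filter (fun g => a ≤ g ∧ g < b) := by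
      apply Finset.filter_congr
      intro g _
      simpa using pv_end_mem_iff m' hm' p (cnt v) g
    have hval : ∀ g ∈ (Finset.range nn).filter (fun g => p ≤ g * m' + m' - 1 ∧ g * m' + m' - 1 < p + cnt v),
        L.getD (g * m' + m' - 1) 0 = v := by
      intro g hg
      have hmem := Finset.mem_filter.mp hg
      have hge : p ≤ g * m' + m' - 1 := hmem.2.1
      have hlt : g * m' + m' - 1 < p + cnt v := hmem.2.2
      have hidx : L[g * m' + m' - 1]? = some v := by
        have h1 : (L.drop p)[g * m' + m' - 1 - p]? = L[p + (g * m' + m' - 1 - p)]? :=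
          List.getElem?_drop
        rw [show p + (g * m' + m' - 1 - p) = g * m' + m' - 1 from by omega] at h1
        rw [← h1, hdrop]
        rw [List.getElem?_append_left (by simpa using (by omega : g * m' + m' - 1 - p < cnt v))]
        simp [(by omega : g * m' + m' - 1 - p < cnt v)]
      rw [List.getD_eq_getElem?_getD, hidx]
      rfl
    have hsplit : ∑ g ∈ (Finset.range nn).filter (fun g => p ≤ g * m' + m' - 1), L.getD (g * m' + m' - 1) 0
        = (∑ g ∈ (Finset.range nn).filter (fun g => p ≤ g * m' + m' - 1 ∧ g * m' + m' - 1 < p + cnt v), L.getD (g * m' + m' - 1) 0)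
        + ∑ g ∈ (Finset.range nn).filter (fun g => p + cnt v ≤ g * m' + m' - 1), L.getD (g * m' + m' - 1) 0 := by
      rw [← Finset.sum_filter_add_sum_filter_not
            ((Finset.range nn).filter (fun g => p ≤ g * m' + m' - 1))
            (fun g => g * m' + m' - 1 < p + cnt v)]
      congr 1
      · rw [Finset.filter_filter]
      · rw [Finset.filter_filter]
        apply Finset.sum_congr _ (fun _ _ => rfl)
        apply Finset.filter_congr
        intro g _
        generalize g * m' + m' - 1 = e
        omega
    have hmid : ∑ g ∈ (Finset.range nn).filter (fun g => p ≤ g * m' + m' - 1 ∧ g * m' + m' - 1 < p + cnt v),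
          L.getD (g * m' + m' - 1) 0 = ((min b nn - min a nn : Nat) : Int) * v := by
      rw [Finset.sum_congr rfl hval, Finset.sum_const, hT, pv_filter_card nn a b hab]
      simp
    rw [hsplit, hΔ]
    rw [hmid] at hsplit ⊢
    ring

-- A's canonical form as a Finset sum
theorem pv_A_sum (m' : Nat) (hm' : 0 < m') (L : List Int) :
    (PySem.List.pyRange 0 (PySem.Int.floordiv (L.length : Int) (m' : Int)) 1).foldl
      (fun total g => total + (PySem.List.pyGet? L (g * (m' : Int) + (m' : Int) - 1)).getD 0 * (m' : Int)) 0
    = (m' : Int) * ∑ g ∈ Finset.range (L.length / m'), L.getD (g * m' + m' - 1) 0 := by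
  rw [PySem.Int.floordiv_natCast, PySem.List.pyRange_zero_natCast, List.foldl_map,
      PySem.List.foldl_add, zero_add]
  have hpt : ∀ g : Nat,
      (PySem.List.pyGet? L ((g : Int) * (m' : Int) + (m' : Int) - 1)).getD 0 = L.getD (g * m' + m' - 1) 0 := by
    intro g
    have e : (g : Int) * (m' : Int) + (m' : Int) - 1 = ((g * m' + m' - 1 : Nat) : Int) := by
      push_cast [Nat.cast_sub (show 1 ≤ g * m' + m' by omega)]
      ring
    rw [e, PySem.List.pyGet?_natCast, List.getD_eq_getElem?_getD]
  simp only [hpt]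
  have hconv : ((List.range (L.length / m')).map (fun g => L.getD (g * m' + m' - 1) 0 * (m' : Int))).sum
      = ∑ g ∈ Finset.range (L.length / m'), L.getD (g * m' + m' - 1) 0 * (m' : Int) := rfl
  rw [hconv, ← Finset.sum_mul]
  ring

-- floor division by a negative divisor is antitone in the numerator
theorem pv_fd_antitone_neg (m x y : Int) (hm : m < 0) (hxy : x ≤ y) :
    PySem.Int.floordiv y m ≤ PySem.Int.floordiv x m := by
  by_contra hcon
  rw [not_le] at hcon
  have h1 := PySem.Int.floordiv_mul_add_mod x m
  have h2 := PySem.Int.floordiv_mul_add_mod y m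
  have h3 := PySem.Int.mod_neg_bounds x hm
  have h4 := PySem.Int.mod_neg_bounds y hm
  have h5 : PySem.Int.floordiv x m + 1 ≤ PySem.Int.floordiv y m := hcon
  have h6 : PySem.Int.floordiv y m * m ≤ (PySem.Int.floordiv x m + 1) * m :=
    mul_le_mul_of_nonpos_right h5 (le_of_lt hm)
  nlinarith

-- for m < 0 the walk contributes nothing: every floordiv is clamped to n
theorem pv_blocks_fold_neg (m : Int) (hm : m < 0) (L : List Int) (cnt : Int → Nat) :
    ∀ (D : List Int) (t : Int) (p : Nat), p ≤ L.length →
    L.drop p = D.flatMap (fun v => List.replicate (cnt v) v) →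
    (D.foldl (fun (tp : Int × Int) v =>
        (tp.1 + v * m * (min (PySem.Int.floordiv (tp.2 + (cnt v : Int)) m) (PySem.Int.floordiv (L.length : Int) m)
            - min (PySem.Int.floordiv tp.2 m) (PySem.Int.floordiv (L.length : Int) m)),
         tp.2 + (cnt v : Int))) (t, (p : Int))).1 = t := by
  intro D
  induction D with
  | nil => intro t p _ _; simp
  | cons v rest ih =>
    intro t p hple hdrop
    rw [List.flatMap_cons] at hdrop
    have hlen : L.length - p = cnt v + (rest.flatMap (fun v => List.replicate (cnt v) v)).length := by
      have := congrArg List.length hdrop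
      simpa using this
    have hpc : p + cnt v ≤ L.length := by omega
    have hd2 : L.drop (p + cnt v) = rest.flatMap (fun v => List.replicate (cnt v) v) := by
      have h := congrArg (List.drop (cnt v)) hdrop
      rwa [List.drop_drop,
           show List.drop (cnt v) (List.replicate (cnt v) v ++ rest.flatMap (fun v => List.replicate (cnt v) v))
              = rest.flatMap (fun v => List.replicate (cnt v) v) from by simp] at h
    rw [List.foldl_cons]
    have hclamp : ∀ x : Nat, x ≤ L.length →
        min (PySem.Int.floordiv (x : Int) m) (PySem.Int.floordiv (L.length : Int) m)
          = PySem.Int.floordiv (L.length : Int) m := by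
      intro x hx
      exact min_eq_right (pv_fd_antitone_neg m (x : Int) (L.length : Int) hm (by exact_mod_cast hx))
    have hcast : ((p : Int) + (cnt v : Int)) = ((p + cnt v : Nat) : Int) := by push_cast; ring
    rw [hcast, hclamp (p + cnt v) hpc, hclamp p hple]
    simp only [sub_self, mul_zero, add_zero]
    exact ih t (p + cnt v) hpc hd2

-- ===== VERDICT helper: the full equivalence =====
theorem solution_spec : Claim_equal_solution := by
  intro k m score _ hm
  unfold Spec_solution solution solution_alt
  simp only []
  rw [PySem.Dict.foldl_insert_getD_add_one_eq_counter, PySem.Dict.keys_counter]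
  simp only [PySem.Dict.getD_counter]
  set L := PySem.List.sorted score (fun x => x) true with hL
  have hLlen : L.length = score.length := PySem.List.length_sorted score (fun x => x) true
  rcases lt_or_gt_of_ne hm with hneg | hpos
  · -- m < 0 : A's loop is empty, B's walk contributes nothing
    have hA : PySem.List.pyRange 0 (L.length : Int) m = [] := by
      unfold PySem.List.pyRange
      rw [if_neg hm]
      have h1 : ¬ (0:Int) < m := by omega
      have h2 : ¬ ((L.length : Int) < 0) := by omega
      simp [h1, h2]
    rw [hA]
    simp only [List.foldl_nil]
    have hB := pv_blocks_fold_neg m hneg L (fun v => score.count v)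
      (PySem.List.sorted (PySem.Set.ofList score) (fun x => x) true) 0 0
      (Nat.zero_le _) (by simpa using pv_sorted_eq_blocks score)
    rw [hLlen] at hB
    exact (by simpa using hB.symm)
  · -- m > 0
    obtain ⟨m', rfl⟩ : ∃ m' : Nat, m = (m' : Int) := ⟨m.toNat, (Int.toNat_of_nonneg (le_of_lt hpos)).symm⟩
    have hm' : 0 < m' := by exact_mod_cast hpos
    have hsort : L.Pairwise (fun a b : Int => b ≤ a) := by
      simpa using PySem.List.sorted_pairwise_rev score (fun x => x)
    have hB := pv_blocks_fold m' hm' L (fun v => score.count v)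
      (PySem.List.sorted (PySem.Set.ofList score) (fun x => x) true) 0 0
      (by simpa using pv_sorted_eq_blocks score)
    rw [hLlen] at hB
    have hfilter : (Finset.range (score.length / m')).filter (fun g => 0 ≤ g * m' + m' - 1)
        = Finset.range (score.length / m') := by
      apply Finset.filter_true_of_mem
      intro g _
      omega
    rw [hfilter] at hB
    calc _ = (m' : Int) * ∑ g ∈ Finset.range (L.length / m'), L.getD (g * m' + m' - 1) 0 := by
              rw [(pv_main_pos L m' hm' hsort), pv_A_sum m' hm' L]
         _ = _ := by rw [hLlen]; exact (by simpa using hB.symm)
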